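-- pv_equiv track=rewrite | github.com/nickchur/ctl_worker | tools/s3_checker.py | _split_mask
-- ===== SOURCE A (Python) =====
-- def _split_mask(full_path):
--     """Разбивает путь на статический Prefix и Mask по первому спецсимволу (* или ?)."""
--     clean = full_path.replace('s3://', '').strip('/')
--     star, qmark = clean.find('*'), clean.find('?')
--     wild = min([p for p in [star, qmark] if p != -1] or [len(clean)])
--     if wild == len(clean):
--         return clean, '*'
--     last_slash = clean.rfind('/', 0, wild)
--     if last_slash == -1:
--         return '', clean
--     return clean[:last_slash + 1], clean[last_slash + 1:]
-- ===== SOURCE B (Python) =====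
-- def _split_mask(full_path):
--     """Single left-to-right scan: track the last slash seen, stop at the first wildcard."""
--     clean = full_path.replace('s3://', '').strip('/')
--     last_slash = -1
--     for i, ch in enumerate(clean):
--         if ch == '*' or ch == '?':
--             if last_slash == -1:
--                 return '', clean
--             return clean[:last_slash + 1], clean[last_slash + 1:]
--         if ch == '/':
--             last_slash = i
--     return clean, '*'
-- ===== Notes on version B (the rewrite author's own statement) =====
-- stated objective: alternative
-- what changed: Replaces the two find passes, the min over them and the bounded rfind pass by a single left-to-right character scan that tracks the most recent slash index and stops at the first wildcard character.
import Mathlib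
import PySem

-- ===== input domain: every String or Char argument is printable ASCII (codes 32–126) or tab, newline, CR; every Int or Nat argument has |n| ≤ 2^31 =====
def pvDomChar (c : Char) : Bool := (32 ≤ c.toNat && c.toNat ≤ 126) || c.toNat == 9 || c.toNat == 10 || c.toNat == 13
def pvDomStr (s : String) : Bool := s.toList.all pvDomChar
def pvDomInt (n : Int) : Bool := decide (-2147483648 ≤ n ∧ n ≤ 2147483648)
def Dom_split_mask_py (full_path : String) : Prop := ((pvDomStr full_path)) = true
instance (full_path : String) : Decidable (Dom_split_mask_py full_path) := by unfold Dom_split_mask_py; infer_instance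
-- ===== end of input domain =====

-- B replaces A's find/find/min/rfind passes by one left-to-right scan tracking the most recent slash (alternative decomposition, same cost).

-- ===== PORT A =====
def split_mask_py (full_path : String) : String × String :=
  let clean := PySem.Str.stripChars (PySem.Str.replace full_path "s3://" "") "/"
  let star := PySem.Str.find clean "*"
  let qmark := PySem.Str.find clean "?"
  let candidates := List.filter (fun p => p != (-1 : Int)) [star, qmark]
  let pool := if candidates.isEmpty then [PySem.Str.len clean] else candidates
  let wild := (PySem.List.min? pool (fun x => x)).getD 0
  if wild = PySem.Str.len clean then (clean, "*")
  else
    let last_slash := PySem.Str.rfindFrom clean "/" 0 (some wild)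
    if last_slash = -1 then ("", clean)
    else (PySem.Str.slice clean none (some (last_slash + 1)),
          PySem.Str.slice clean (some (last_slash + 1)) none)

-- ===== PORT B =====
-- the for-loop of Source B: cs = remaining chars, i = current index, lastSlash = last '/' index (-1 = none)
def pvScanSplit (cs : List Char) (i : Nat) (lastSlash : Int) (clean : String) : String × String :=
  match cs with
  | [] => (clean, "*")
  | c :: rest =>
    if c == '*' || c == '?' then
      if lastSlash = -1 then ("", clean)
      else (String.ofList (clean.toList.take (lastSlash.toNat + 1)),
            String.ofList (clean.toList.drop (lastSlash.toNat + 1)))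
    else pvScanSplit rest (i + 1) (if c == '/' then (i : Int) else lastSlash) clean

def split_mask_py_alt (full_path : String) : String × String :=
  let clean := PySem.Str.stripChars (PySem.Str.replace full_path "s3://" "") "/"
  pvScanSplit clean.toList 0 (-1) clean

-- ===== PRECONDITION & SPEC =====
def Spec_split_mask_py (full_path : String) (out : String × String) : Prop := out = split_mask_py_alt full_path
instance (full_path : String) (out : String × String) : Decidable (Spec_split_mask_py full_path out) := by unfold Spec_split_mask_py; infer_instance

-- ===== CLAIM (what is proved, stated in full; the proofs are below) =====
def Claim_equal_split_mask_py : Prop := ∀ (full_path : String), Dom_split_mask_py full_path → Spec_split_mask_py full_path (split_mask_py full_path)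

-- ===== LEMMAS AND PROOFS =====

-- index of the LAST occurrence of c in l (none if absent)
def pvLastIdx? (c : Char) : List Char → Option Nat
  | [] => none
  | a :: t =>
    match pvLastIdx? c t with
    | some k => some (k + 1)
    | none => if a == c then some 0 else none

-- find.go with accumulator = first index + offset
theorem pv_find_go (c : Char) (l : List Char) (k : Nat) :
    PySem.Chars.find.go [c] l k =
      match List.findIdx? (fun a => a == c) l with
      | some i => ((k + i : Nat) : Int)
      | none => -1 := by
  induction l generalizing k with
  | nil => simp [PySem.Chars.find.go]
  | cons a t ih =>
    rw [PySem.Chars.find.go]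
    by_cases h : a = c
    · simp [h, List.isPrefixOf, List.findIdx?_cons]
    · have hb : (a == c) = false := by simp [h]
      simp only [List.isPrefixOf, hb, Bool.false_eq_true, if_false,
        List.findIdx?_cons, ih]
      cases hf : List.findIdx? (fun a => a == c) t with
      | none => simp [Ne.symm h]
      | some i =>
        simp only [Option.map_some]
        have : (k : Int) + (i + 1) = ((k + 1 + i : Nat) : Int) := by push_cast; ring
        simp [this, Ne.symm h]

theorem pv_find_single (c : Char) (l : List Char) :
    PySem.Chars.find l [c] =
      match List.findIdx? (fun a => a == c) l with
      | some i => (i : Int)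
      | none => -1 := by
  have := pv_find_go c l 0
  simpa [PySem.Chars.find] using this

-- rfind.go on a cons
theorem pv_rfind_go_cons (c a : Char) (t : List Char) (j : Nat) :
    PySem.Chars.rfind.go (a :: t) [c] (j + 1) =
      (if PySem.Chars.rfind.go t [c] j = -1 then (if a == c then 0 else -1)
       else PySem.Chars.rfind.go t [c] j + 1) := by
  induction j with
  | zero =>
    rw [PySem.Chars.rfind.go, PySem.Chars.rfind.go, PySem.Chars.rfind.go]
    by_cases h : [c].isPrefixOf t
    · simp [h]
    · by_cases ha : a = c
      · simp [h, ha, List.isPrefixOf]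
      · simp [h, ha, List.isPrefixOf, Ne.symm ha]
  | succ j ih =>
    rw [PySem.Chars.rfind.go]
    conv_rhs => rw [PySem.Chars.rfind.go]
    simp only [List.drop_succ_cons]
    by_cases h : [c].isPrefixOf (t.drop (j + 1))
    · simp [h]; omega
    · simp [h, ih]

theorem pv_rfind_single (c : Char) (l : List Char) :
    PySem.Chars.rfind l [c] =
      match pvLastIdx? c l with
      | some k => (k : Int)
      | none => -1 := by
  induction l with
  | nil => simp [PySem.Chars.rfind, PySem.Chars.rfind.go, pvLastIdx?, List.isPrefixOf]
  | cons a t ih =>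
    have h1 : PySem.Chars.rfind (a :: t) [c]
        = PySem.Chars.rfind.go (a :: t) [c] (t.length + 1) := by
      simp [PySem.Chars.rfind]
    rw [h1, pv_rfind_go_cons]
    have h2 : PySem.Chars.rfind.go t [c] t.length = PySem.Chars.rfind t [c] := rfl
    rw [h2, ih]
    cases hf : pvLastIdx? c t with
    | none =>
      by_cases ha : a = c
      · simp [pvLastIdx?, hf, ha]
      · simp [pvLastIdx?, hf, ha]
    | some k => simp [pvLastIdx?, hf]

-- Option-min used to combine the two findIdx? results
def pvOMin (x y : Option Nat) : Option Nat :=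
  match x, y with
  | none, y => y
  | x, none => x
  | some i, some j => some (min i j)

theorem pv_findIdx?_or (p q : Char → Bool) (l : List Char) :
    List.findIdx? (fun c => p c || q c) l = pvOMin (List.findIdx? p l) (List.findIdx? q l) := by
  induction l with
  | nil => simp [pvOMin]
  | cons a t ih =>
    simp only [List.findIdx?_cons, ih]
    by_cases hp : p a <;> by_cases hq : q a <;>
      simp [hp, hq, pvOMin] <;>
      cases List.findIdx? p t <;> cases List.findIdx? q t <;>
        simp

-- invariant of Source B's loop
theorem pv_scan_spec (cs : List Char) (i : Nat) (ls : Int) (clean : String) :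
    pvScanSplit cs i ls clean =
      match List.findIdx? (fun c => c == '*' || c == '?') cs with
      | none => (clean, "*")
      | some w =>
        let ls' : Int := match pvLastIdx? '/' (cs.take w) with
          | some k => ((i + k : Nat) : Int)
          | none => ls
        if ls' = -1 then ("", clean)
        else (String.ofList (clean.toList.take (ls'.toNat + 1)),
              String.ofList (clean.toList.drop (ls'.toNat + 1))) := by
  induction cs generalizing i ls with
  | nil => simp [pvScanSplit]
  | cons a t ih =>
    by_cases hw : (a == '*' || a == '?') = true
    · simp [pvScanSplit, hw, List.findIdx?_cons, pvLastIdx?]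
    · rw [pvScanSplit]
      simp only [hw, Bool.false_eq_true, if_false, List.findIdx?_cons, ih]
      cases hf : List.findIdx? (fun c => c == '*' || c == '?') t with
      | none => simp
      | some w =>
        simp only [Option.map_some, List.take_succ_cons]
        by_cases hs : a == '/'
        · cases hl : pvLastIdx? '/' (t.take w) with
          | none => simp [pvLastIdx?, hl, hs]
          | some k =>
            simp only [pvLastIdx?, hl]
            have hik : ((i + 1 + k : Nat) : Int) = ((i + (k + 1) : Nat) : Int) := by push_cast; ring
            rw [hik]
        · cases hl : pvLastIdx? '/' (t.take w) with
          | none => simp [pvLastIdx?, hl, hs]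
          | some k =>
            simp only [pvLastIdx?, hl]
            have hik : ((i + 1 + k : Nat) : Int) = ((i + (k + 1) : Nat) : Int) := by push_cast; ring
            rw [hik]

theorem pv_rfindFrom_zero (cs : List Char) (c : Char) (w : Nat) (hw : w ≤ cs.length) :
    PySem.Chars.rfindFrom cs [c] 0 (some (w : Int)) =
      match pvLastIdx? c (cs.take w) with
      | some k => (k : Int)
      | none => -1 := by
  have hnw : ¬ ((cs.length : Int) < (w : Int)) := by exact_mod_cast Nat.not_lt.mpr hw
  have h0 : ¬ ((w : Int) < 0) := by omega
  simp only [PySem.Chars.rfindFrom, hnw, h0, if_false]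
  simp [pv_rfind_single]
  cases hl : pvLastIdx? c (cs.take w) with
  | none => simp
  | some k => simp
theorem pv_else (s : String) (w : Nat) (hw : w ≤ s.toList.length) :
    (let last_slash := PySem.Str.rfindFrom s "/" 0 (some (w : Int))
     if last_slash = -1 then ("", s)
     else (PySem.Str.slice s none (some (last_slash + 1)),
           PySem.Str.slice s (some (last_slash + 1)) none)) =
      (let ls' : Int := match pvLastIdx? '/' (s.toList.take w) with
          | some k => ((0 + k : Nat) : Int)
          | none => -1
       if ls' = -1 then ("", s)
       else (String.ofList (s.toList.take (ls'.toNat + 1)),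
             String.ofList (s.toList.drop (ls'.toNat + 1)))) := by
  have htl : ("/" : String).toList = ['/'] := by decide
  have h1 : PySem.Str.rfindFrom s "/" 0 (some (w : Int)) =
      match pvLastIdx? '/' (s.toList.take w) with
      | some k => (k : Int)
      | none => -1 := by
    rw [PySem.Str.rfindFrom_eq, htl, pv_rfindFrom_zero s.toList '/' w hw]
  simp only [h1]
  cases hl : pvLastIdx? '/' (s.toList.take w) with
  | none => simp
  | some k =>
    have hk : ((k : Int)) ≠ -1 := by omega
    have hk0 : ((0 + k : Nat) : Int) ≠ -1 := by omega
    simp only [hk, if_false, Nat.zero_add]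
    refine Prod.ext_iff.mpr ⟨?_, ?_⟩
    · apply String.toList_inj.mp
      rw [PySem.Str.toList_slice, PySem.Chars.slice_eq_listSlice, String.toList_ofList]
      rw [PySem.List.slice_to s.toList (by omega : (0:Int) ≤ (k : Int) + 1)]
      congr 1
    · apply String.toList_inj.mp
      rw [PySem.Str.toList_slice, PySem.Chars.slice_eq_listSlice, String.toList_ofList]
      rw [PySem.List.slice_from s.toList (by omega : (0:Int) ≤ (k : Int) + 1)]
      congr 1

theorem pv_main (s : String) :
    (let star := PySem.Str.find s "*"
     let qmark := PySem.Str.find s "?"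
     let candidates := List.filter (fun p => p != (-1 : Int)) [star, qmark]
     let pool := if candidates.isEmpty then [PySem.Str.len s] else candidates
     let wild := (PySem.List.min? pool (fun x => x)).getD 0
     if wild = PySem.Str.len s then (s, "*")
     else
       let last_slash := PySem.Str.rfindFrom s "/" 0 (some wild)
       if last_slash = -1 then ("", s)
       else (PySem.Str.slice s none (some (last_slash + 1)),
             PySem.Str.slice s (some (last_slash + 1)) none)) =
      pvScanSplit s.toList 0 (-1) s := by
  rw [pv_scan_spec]
  have hor : List.findIdx? (fun c => c == '*' || c == '?') s.toList
      = pvOMin (List.findIdx? (fun a => a == '*') s.toList)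
          (List.findIdx? (fun a => a == '?') s.toList) :=
    pv_findIdx?_or _ _ _
  have hstar : PySem.Str.find s "*"
      = match List.findIdx? (fun a => a == '*') s.toList with
        | some i => (i : Int)
        | none => -1 := by
    rw [PySem.Str.find_eq, show ("*" : String).toList = ['*'] by decide, pv_find_single]
  have hqmark : PySem.Str.find s "?"
      = match List.findIdx? (fun a => a == '?') s.toList with
        | some i => (i : Int)
        | none => -1 := by
    rw [PySem.Str.find_eq, show ("?" : String).toList = ['?'] by decide, pv_find_single]
  have hlen : PySem.Str.len s = (s.toList.length : Int) := by
    simp [PySem.Str.len_eq]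
  cases hS : List.findIdx? (fun a => a == '*') s.toList with
  | none =>
    cases hQ : List.findIdx? (fun a => a == '?') s.toList with
    | none =>
      simp only [hstar, hqmark, hS, hQ, hor, pvOMin, List.filter, bne_self_eq_false,
        List.isEmpty_nil, PySem.List.min?, List.foldl, Option.getD, hlen, if_true]
    | some j =>
      obtain ⟨hj, -, -⟩ := List.findIdx?_eq_some_iff_getElem.mp hQ
      have hne : ((j : Int) != -1) = true := by simp
      have hne2 : ((j : Int)) ≠ ((s.toList.length : Nat) : Int) := by omega
      simp only [hstar, hqmark, hS, hQ, hor, pvOMin, hlen, PySem.List.min?, hne,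
        List.filter, bne_self_eq_false, List.isEmpty_cons, List.foldl, Option.getD,
        if_neg hne2, Bool.false_eq_true, if_false]
      exact pv_else s j hj.le
  | some i =>
    obtain ⟨hi, -, -⟩ := List.findIdx?_eq_some_iff_getElem.mp hS
    have hnei : ((i : Int) != -1) = true := by simp
    cases hQ : List.findIdx? (fun a => a == '?') s.toList with
    | none =>
      have hne2 : ((i : Int)) ≠ ((s.toList.length : Nat) : Int) := by omega
      simp only [hstar, hqmark, hS, hQ, hor, pvOMin, hlen, PySem.List.min?, hnei,
        List.filter, bne_self_eq_false, List.isEmpty_cons, List.foldl, Option.getD,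
        if_neg hne2, Bool.false_eq_true, if_false]
      exact pv_else s i hi.le
    | some j =>
      obtain ⟨hj, -, -⟩ := List.findIdx?_eq_some_iff_getElem.mp hQ
      have hnej : ((j : Int) != -1) = true := by simp
      have hmin : (if (j : Int) < (i : Int) then some (j : Int) else some (i : Int))
          = some ((min i j : Nat) : Int) := by
        split_ifs with h <;> (congr 1; push_cast; omega)
      have hne2 : (((min i j : Nat) : Int)) ≠ ((s.toList.length : Nat) : Int) := by
        have : min i j ≤ i := Nat.min_le_left _ _
        omega
      simp only [hstar, hqmark, hS, hQ, hor, pvOMin, hnei, hnej, hlen,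
        List.filter, List.isEmpty_cons, PySem.List.min?, List.foldl, hmin, Option.getD_some,
        if_neg hne2, Bool.false_eq_true, if_false]
      exact pv_else s (min i j) (le_of_lt (lt_of_le_of_lt (Nat.min_le_left _ _) hi))

-- ===== VERDICT (by name: the statement is the Claim_ definition above) =====
theorem split_mask_py_spec : Claim_equal_split_mask_py := by
  intro full_path _
  unfold Spec_split_mask_py split_mask_py split_mask_py_alt
  exact pv_main (PySem.Str.stripChars (PySem.Str.replace full_path "s3://" "") "/")
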